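-- pv_equiv track=rewrite | github.com/bmcano/homework-assignments | Computer-Science-1/Labs/Lab4.py | isVowel
-- ===== SOURCE A (Python) =====
-- def isVowel(word, i):
--     a = word[i]
--     if a in 'aeio':
--         return True
--     elif a in 'y' and (1!=0 and not isVowel(word, i-1)):
--         return True
--     elif a in 'u' and (i==0 or word[i-1] not in 'gq'):
--         return True
--     elif a in 'w' and (1!=0 and isVowel(word, i-1)):
--         return True
--     return False
-- ===== SOURCE B (Python) =====
-- def isVowel(word, i):
--     flip = False
--     while word[i] in 'yw':
--         flip = flip != (word[i] == 'y')
--         i -= 1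
--     c = word[i]
--     base = c in 'aeio' or (c == 'u' and (i == 0 or word[i-1] not in 'gq'))
--     return base != flip
-- ===== Notes on version B (the rewrite author's own statement) =====
-- stated objective: simpler
-- what changed: Replaces the y/w recursion (each level negating or passing through the recursive result) by a single iterative walk down the chain that accumulates the negations as a parity flag, then XORs the flag with the base vowel test at the terminal character.
import Mathlib
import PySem

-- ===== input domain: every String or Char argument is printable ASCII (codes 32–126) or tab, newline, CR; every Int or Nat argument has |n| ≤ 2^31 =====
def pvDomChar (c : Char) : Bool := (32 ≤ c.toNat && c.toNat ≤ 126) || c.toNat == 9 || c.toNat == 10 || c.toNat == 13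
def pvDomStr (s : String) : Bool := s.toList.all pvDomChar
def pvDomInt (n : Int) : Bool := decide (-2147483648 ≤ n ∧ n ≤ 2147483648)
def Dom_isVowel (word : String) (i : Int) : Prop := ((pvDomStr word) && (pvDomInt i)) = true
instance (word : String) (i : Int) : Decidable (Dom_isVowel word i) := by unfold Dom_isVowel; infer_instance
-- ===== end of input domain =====

-- B replaces A's negate-on-return recursion by one iterative chain walk with a parity flag ("simpler");
-- equal on all inputs where A returns (Pre_); on inputs outside Pre_ both Pythons raise IndexError.

-- ===== PORT A =====
-- fuel = 2*len+2 bounds the recursion depth (the chain visits at most the indices i..0 and one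
-- wrapped pass len-1..0 before Python's IndexError); none = the Python raises there.
def isVowelFuel : Nat → String → Int → Option Bool
  | 0, _, _ => none
  | f+1, word, i =>
    match PySem.Str.pyGet? word i with
    | none => none            -- word[i] IndexError
    | some a =>
      if a = 'a' ∨ a = 'e' ∨ a = 'i' ∨ a = 'o' then some true
      else if a = 'y' then
        match isVowelFuel f word (i-1) with
        | none => none
        | some r => if !r then some true else some false  -- falls through u/w tests (a ≠ 'u','w') to `return False`
      else if a = 'u' then
        if i = 0 then some true
        else match PySem.Str.pyGet? word (i-1) with
          | none => none      -- word[i-1] IndexError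
          | some b => if ¬(b = 'g' ∨ b = 'q') then some true else some false
      else if a = 'w' then
        match isVowelFuel f word (i-1) with
        | none => none
        | some r => if r then some true else some false
      else some false

def isVowel (word : String) (i : Int) : Bool :=
  (isVowelFuel (2 * word.length + 2) word i).getD false

-- ===== PORT B =====
-- the while-loop of Source B; same fuel guard for totality, none = IndexError.
def isVowelLoop : Nat → String → Int → Bool → Option Bool
  | 0, _, _, _ => none
  | f+1, word, i, flip =>
    match PySem.Str.pyGet? word i with
    | none => none
    | some c =>
      if c = 'y' ∨ c = 'w' then
        isVowelLoop f word (i-1) (xor flip (decide (c = 'y')))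
      else
        let base : Option Bool :=
          if c = 'a' ∨ c = 'e' ∨ c = 'i' ∨ c = 'o' then some true
          else if c = 'u' then
            if i = 0 then some true
            else match PySem.Str.pyGet? word (i-1) with
              | none => none
              | some b => some (!(b = 'g' ∨ b = 'q' : Bool))
          else some false
        base.map (fun bs => xor bs flip)

def isVowel_alt (word : String) (i : Int) : Bool :=
  (isVowelLoop (2 * word.length + 2) word i false).getD false

-- ===== PRECONDITION & SPEC =====
-- Pre_ excludes exactly the inputs on which A raises IndexError: an index outside [-len, len),
-- or a y/w chain that runs off the front of the word (all inspected characters are 'y'/'w'),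
-- or a negative start whose chain terminates at index 0 on a 'u' (its `i==0` test sees the raw
-- negative index, so word[i-1] is evaluated out of range). B raises IndexError on the same inputs.
def pvYW (c : Char) : Bool := c = 'y' || c = 'w'

def Pre_isVowel (word : String) (i : Int) : Prop :=
  0 ≤ i + word.toList.length ∧ i < word.toList.length ∧
  (if 0 ≤ i then
     ∃ k, k < word.toList.length ∧ pvYW (word.toList.getD k ' ') = false
   else
     (∃ k, k < (i + word.toList.length).toNat + 1 ∧ pvYW (word.toList.getD k ' ') = false) ∧
     (word.toList.getD 0 ' ' = 'u' →
       ∃ k, k < (i + word.toList.length).toNat + 1 ∧ 1 ≤ k ∧ pvYW (word.toList.getD k ' ') = false))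
instance (word : String) (i : Int) : Decidable (Pre_isVowel word i) := by
  unfold Pre_isVowel; infer_instance

def pvWitness_isVowel : String × Int := ("ab", 0)

def Spec_isVowel (word : String) (i : Int) (out : Bool) : Prop := out = isVowel_alt word i
instance (word : String) (i : Int) (out : Bool) : Decidable (Spec_isVowel word i out) := by
  unfold Spec_isVowel; infer_instance

-- ===== CLAIM (what is proved, stated in full; the proofs are below) =====
def Claim_equal_isVowel : Prop := ∀ (word : String) (i : Int), Dom_isVowel word i → Pre_isVowel word i → Spec_isVowel word i (isVowel word i)

-- ===== LEMMAS AND PROOFS =====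

-- B's loop is A's recursion with the pending negations accumulated in the flag:
-- on any fuel, isVowelLoop f w i flip = (isVowelFuel f w i).map (xor · flip).
theorem loop_eq_fuel (f : Nat) : ∀ (word : String) (i : Int) (flip : Bool),
    isVowelLoop f word i flip = (isVowelFuel f word i).map (fun b => xor b flip) := by
  induction f with
  | zero => intro word i flip; rfl
  | succ f ih =>
    intro word i flip
    rw [isVowelLoop, isVowelFuel]
    cases h : PySem.Str.pyGet? word i with
    | none => rfl
    | some a =>
      by_cases hy : a = 'y'
      · subst hy
        simp only [ih word (i-1)]
        cases isVowelFuel f word (i-1) with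
        | none => rfl
        | some r => cases r <;> cases flip <;> rfl
      · by_cases hw : a = 'w'
        · subst hw
          have : ¬('w' = 'a' ∨ 'w' = 'e' ∨ 'w' = 'i' ∨ 'w' = 'o') := by decide
          simp only [if_neg this, if_neg (by decide : ¬'w' = 'y'),
            if_neg (by decide : ¬'w' = 'u'), ih word (i-1)]
          cases isVowelFuel f word (i-1) with
          | none => rfl
          | some r => cases r <;> cases flip <;> rfl
        · have hyw : ¬(a = 'y' ∨ a = 'w') := by tauto
          simp only [if_neg hyw]
          by_cases hv : a = 'a' ∨ a = 'e' ∨ a = 'i' ∨ a = 'o'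
          · simp [if_pos hv]
          · simp only [if_neg hv, if_neg hy]
            by_cases hu : a = 'u'
            · simp only [if_pos hu]
              by_cases h0 : i = 0
              · simp [if_pos h0]
              · simp only [if_neg h0]
                cases PySem.Str.pyGet? word (i-1) with
                | none => rfl
                | some b =>
                  by_cases hgq : b = 'g' ∨ b = 'q'
                  · simp [hgq]
                  · simp [hgq]
            · simp [if_neg hu, if_neg hw]

-- ===== VERDICT (by name: the statement is the Claim_ definition above) =====
theorem isVowel_spec : Claim_equal_isVowel := by
  intro word i _ _
  unfold Spec_isVowel isVowel isVowel_alt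
  rw [loop_eq_fuel]
  cases isVowelFuel (2 * word.length + 2) word i with
  | none => rfl
  | some b => cases b <;> rfl
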